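-- pv_equiv track=rewrite | github.com/pete9936/pyTWTL_ObsAvoid | src/create_environment.py | update_adj_mat
-- ===== SOURCE A (Python) =====
-- def update_adj_mat(m, n, adj_mat, obs_mat):
--     ''' Update the adjacency matrix given an observation matrix '''
--     for i in range(m):
--         for j in range(n):
--             if obs_mat[i][j] != 3:
--                 diag_ind = n*i + j
--                 adj_mat[diag_ind][diag_ind] = 1
--                 if j < n-1:
--                     right_ind = n*i + j + 1
--                     if obs_mat[i][j+1] != 3:
--                         adj_mat[diag_ind][right_ind] = 1
--                         adj_mat[right_ind][diag_ind] = 1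
--                     else:
--                         adj_mat[diag_ind][right_ind] = 0
--                         adj_mat[right_ind][diag_ind] = 0
--                 if j > 0:
--                     left_ind = n*i + j - 1
--                     if obs_mat[i][j-1] != 3:
--                         adj_mat[diag_ind][left_ind] = 1
--                         adj_mat[left_ind][diag_ind] = 1
--                     else:
--                         adj_mat[diag_ind][left_ind] = 0
--                         adj_mat[left_ind][diag_ind] = 0
--                 if i > 0:
--                     up_ind = n*(i-1) + j
--                     if obs_mat[i-1][j] != 3:
--                         adj_mat[diag_ind][up_ind] = 1
--                         adj_mat[up_ind][diag_ind] = 1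
--                     else:
--                         adj_mat[diag_ind][up_ind] = 0
--                         adj_mat[up_ind][diag_ind] = 0
--                 if i < m-1:
--                     down_ind = n*(i+1) + j
--                     if obs_mat[i+1][j] != 3:
--                         adj_mat[diag_ind][down_ind] = 1
--                         adj_mat[down_ind][diag_ind] = 1
--                     else:
--                         adj_mat[diag_ind][down_ind] = 0
--                         adj_mat[down_ind][diag_ind] = 0
--             else:
--                 # this indicates the region is an obstacle
--                 diag_ind = n*i + j
--                 adj_mat[diag_ind][diag_ind] = 0
--                 if j < n-1:
--                     right_ind = n*i + j + 1
--                     adj_mat[diag_ind][right_ind] = 0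
--                     adj_mat[right_ind][diag_ind] = 0
--                 if j > 0:
--                     left_ind = n*i + j - 1
--                     adj_mat[diag_ind][left_ind] = 0
--                     adj_mat[left_ind][diag_ind] = 0
--                 if i > 0:
--                     up_ind = n*(i-1) + j
--                     adj_mat[diag_ind][up_ind] = 0
--                     adj_mat[up_ind][diag_ind] = 0
--                 if i < m-1:
--                     down_ind = n*(i+1) + j
--                     adj_mat[diag_ind][down_ind] = 0
--                     adj_mat[down_ind][diag_ind] = 0
--     return adj_mat
-- ===== SOURCE B (Python) =====
-- def update_adj_mat(m, n, adj_mat, obs_mat):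
--     ''' Update the adjacency matrix given an observation matrix '''
--     # Pass 1: diagonal entries — 1 iff the cell is free.
--     for i in range(m):
--         for j in range(n):
--             d = n * i + j
--             adj_mat[d][d] = 1 if obs_mat[i][j] != 3 else 0
--     # Pass 2: each undirected grid edge exactly once (right and down neighbours);
--     # the entry pair is 1 iff both endpoints are free.
--     for i in range(m):
--         for j in range(n):
--             a = n * i + j
--             if j < n - 1:
--                 v = 1 if obs_mat[i][j] != 3 and obs_mat[i][j + 1] != 3 else 0
--                 adj_mat[a][a + 1] = v
--                 adj_mat[a + 1][a] = v
--             if i < m - 1: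
--                 b = n * (i + 1) + j
--                 v = 1 if obs_mat[i][j] != 3 and obs_mat[i + 1][j] != 3 else 0
--                 adj_mat[a][b] = v
--                 adj_mat[b][a] = v
--     return adj_mat
-- ===== Notes on version B (the rewrite author's own statement) =====
-- stated objective: simpler
-- what changed: A's duplicated free/obstacle four-neighbour branch logic per cell is replaced by a diagonal pass (1 iff the cell is free) plus a pass visiting each undirected grid edge exactly once (right and down neighbours), writing both symmetric entries with the single formula 1 iff both endpoints are free.
import Mathlib
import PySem

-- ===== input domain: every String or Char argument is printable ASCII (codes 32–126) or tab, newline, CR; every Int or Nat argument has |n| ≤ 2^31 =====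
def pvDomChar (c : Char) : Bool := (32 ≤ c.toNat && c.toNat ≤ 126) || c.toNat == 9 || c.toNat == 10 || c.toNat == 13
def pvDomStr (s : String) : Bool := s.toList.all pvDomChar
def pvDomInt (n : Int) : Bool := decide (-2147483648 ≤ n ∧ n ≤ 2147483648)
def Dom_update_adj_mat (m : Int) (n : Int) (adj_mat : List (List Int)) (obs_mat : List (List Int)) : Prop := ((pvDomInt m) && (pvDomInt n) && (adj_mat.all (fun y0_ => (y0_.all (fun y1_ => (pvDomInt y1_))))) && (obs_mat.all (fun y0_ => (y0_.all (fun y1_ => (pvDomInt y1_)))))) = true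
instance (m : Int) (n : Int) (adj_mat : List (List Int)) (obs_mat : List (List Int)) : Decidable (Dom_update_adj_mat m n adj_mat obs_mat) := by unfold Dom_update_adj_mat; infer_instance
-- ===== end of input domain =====

-- B replaces A's duplicated free/obstacle four-neighbour branches by a diagonal pass plus an
-- each-undirected-edge-once pass with the single symmetric formula “1 iff both endpoints free”
-- (objective: simpler; same O(m·n) cost). Both Pythons mutate adj_mat in place identically;
-- the theorems below are about the returned matrix.

-- ===== PORT A =====
-- obs_mat[i][j] — exact where the index is in range (guaranteed by Pre_; Python raises IndexError otherwise)
def obsAt (obs : List (List Int)) (i j : Int) : Int :=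
  PySem.List.pyGetD (PySem.List.pyGetD obs i []) j 0

-- adj[r][c] = v — exact where both indices are in range (guaranteed by Pre_; Python raises IndexError otherwise)
def setAt (g : List (List Int)) (r c v : Int) : List (List Int) :=
  PySem.List.pySetD g r (PySem.List.pySetD (PySem.List.pyGetD g r []) c v)

def update_adj_mat (m : Int) (n : Int) (adj_mat : List (List Int)) (obs_mat : List (List Int)) : List (List Int) :=
  (PySem.List.pyRange 0 m 1).foldl (fun g i =>
    (PySem.List.pyRange 0 n 1).foldl (fun g j =>
      if obsAt obs_mat i j ≠ 3 then
        let diag_ind := n*i + j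
        let g := setAt g diag_ind diag_ind 1
        let g := if j < n - 1 then
            let right_ind := n*i + j + 1
            if obsAt obs_mat i (j+1) ≠ 3 then
              setAt (setAt g diag_ind right_ind 1) right_ind diag_ind 1
            else
              setAt (setAt g diag_ind right_ind 0) right_ind diag_ind 0
          else g
        let g := if j > 0 then
            let left_ind := n*i + j - 1
            if obsAt obs_mat i (j-1) ≠ 3 then
              setAt (setAt g diag_ind left_ind 1) left_ind diag_ind 1
            else
              setAt (setAt g diag_ind left_ind 0) left_ind diag_ind 0
          else g
        let g := if i > 0 then
            let up_ind := n*(i-1) + j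
            if obsAt obs_mat (i-1) j ≠ 3 then
              setAt (setAt g diag_ind up_ind 1) up_ind diag_ind 1
            else
              setAt (setAt g diag_ind up_ind 0) up_ind diag_ind 0
          else g
        if i < m - 1 then
            let down_ind := n*(i+1) + j
            if obsAt obs_mat (i+1) j ≠ 3 then
              setAt (setAt g diag_ind down_ind 1) down_ind diag_ind 1
            else
              setAt (setAt g diag_ind down_ind 0) down_ind diag_ind 0
          else g
      else
        let diag_ind := n*i + j
        let g := setAt g diag_ind diag_ind 0
        let g := if j < n - 1 then
            let right_ind := n*i + j + 1
            setAt (setAt g diag_ind right_ind 0) right_ind diag_ind 0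
          else g
        let g := if j > 0 then
            let left_ind := n*i + j - 1
            setAt (setAt g diag_ind left_ind 0) left_ind diag_ind 0
          else g
        let g := if i > 0 then
            let up_ind := n*(i-1) + j
            setAt (setAt g diag_ind up_ind 0) up_ind diag_ind 0
          else g
        if i < m - 1 then
            let down_ind := n*(i+1) + j
            setAt (setAt g diag_ind down_ind 0) down_ind diag_ind 0
          else g
    ) g) adj_mat

-- ===== PORT B =====
def update_adj_mat_alt (m : Int) (n : Int) (adj_mat : List (List Int)) (obs_mat : List (List Int)) : List (List Int) :=
  let g1 := (PySem.List.pyRange 0 m 1).foldl (fun g i =>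
    (PySem.List.pyRange 0 n 1).foldl (fun g j =>
      let d := n*i + j
      setAt g d d (if obsAt obs_mat i j ≠ 3 then 1 else 0)) g) adj_mat
  (PySem.List.pyRange 0 m 1).foldl (fun g i =>
    (PySem.List.pyRange 0 n 1).foldl (fun g j =>
      let a := n*i + j
      let g := if j < n - 1 then
          let v := if obsAt obs_mat i j ≠ 3 ∧ obsAt obs_mat i (j+1) ≠ 3 then 1 else 0
          setAt (setAt g a (a+1) v) (a+1) a v
        else g
      if i < m - 1 then
          let b := n*(i+1) + j
          let v := if obsAt obs_mat i j ≠ 3 ∧ obsAt obs_mat (i+1) j ≠ 3 then 1 else 0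
          setAt (setAt g a b v) b a v
        else g) g) g1

-- ===== PRECONDITION & SPEC =====
-- Pre_ excludes exactly the inputs on which A raises IndexError: when the grid is non-trivial
-- (m, n > 0), obs_mat needs m rows of length ≥ n, adj_mat needs m·n rows, and each touched row r
-- must extend past its largest touched column (r+n if a down neighbour exists, else r+1 if a right
-- neighbour exists, else r).
def Pre_update_adj_mat (m : Int) (n : Int) (adj_mat : List (List Int)) (obs_mat : List (List Int)) : Prop :=
  (0 < m ∧ 0 < n) →
    ( m ≤ (obs_mat.length : Int)
    ∧ (∀ i < m.toNat, n ≤ ((obs_mat.getD i []).length : Int))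
    ∧ m * n ≤ (adj_mat.length : Int)
    ∧ (∀ r < m.toNat * n.toNat,
        (if r + n.toNat < m.toNat * n.toNat then r + n.toNat
         else if r % n.toNat + 1 < n.toNat then r + 1 else r) < (adj_mat.getD r []).length))
instance (m : Int) (n : Int) (adj_mat : List (List Int)) (obs_mat : List (List Int)) : Decidable (Pre_update_adj_mat m n adj_mat obs_mat) := by unfold Pre_update_adj_mat; infer_instance

def pvWitness_update_adj_mat : Int × Int × List (List Int) × List (List Int) :=
  (2, 2, [[9,9,9,9],[9,9,9,9],[9,9,9,9],[9,9,9,9]], [[0,3],[0,0]])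

def Spec_update_adj_mat (m : Int) (n : Int) (adj_mat : List (List Int)) (obs_mat : List (List Int)) (out : List (List Int)) : Prop := out = update_adj_mat_alt m n adj_mat obs_mat
instance (m : Int) (n : Int) (adj_mat : List (List Int)) (obs_mat : List (List Int)) (out : List (List Int)) : Decidable (Spec_update_adj_mat m n adj_mat obs_mat out) := by unfold Spec_update_adj_mat; infer_instance

-- ===== CLAIM (what is proved, stated in full; the proofs are below) =====
def Claim_equal_update_adj_mat : Prop := ∀ (m : Int) (n : Int) (adj_mat : List (List Int)) (obs_mat : List (List Int)), Dom_update_adj_mat m n adj_mat obs_mat → Pre_update_adj_mat m n adj_mat obs_mat → Spec_update_adj_mat m n adj_mat obs_mat (update_adj_mat m n adj_mat obs_mat)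

-- ===== LEMMAS AND PROOFS =====

-- writes as (row, col, value) triples; applying a write list left to right
def pvApp1 (g : List (List Int)) (t : Int × Int × Int) : List (List Int) := setAt g t.1 t.2.1 t.2.2
def pvApply (g : List (List Int)) (w : List (Int × Int × Int)) : List (List Int) := w.foldl pvApp1 g

def pvPair (d e v : Int) : List (Int × Int × Int) := [(d, e, v), (e, d, v)]

-- the writes A performs at cell (i, j), with every value written as "1 iff both endpoints free"
def pvCellC (m n : Int) (obs : List (List Int)) (i j : Int) : List (Int × Int × Int) :=
  let d := n*i + j
  [(d, d, if obsAt obs i j ≠ 3 then 1 else 0)]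
  ++ (if j < n - 1 then pvPair d (d+1) (if obsAt obs i j ≠ 3 ∧ obsAt obs i (j+1) ≠ 3 then 1 else 0) else [])
  ++ (if j > 0 then pvPair d (d-1) (if obsAt obs i j ≠ 3 ∧ obsAt obs i (j-1) ≠ 3 then 1 else 0) else [])
  ++ (if i > 0 then pvPair d (n*(i-1)+j) (if obsAt obs i j ≠ 3 ∧ obsAt obs (i-1) j ≠ 3 then 1 else 0) else [])
  ++ (if i < m - 1 then pvPair d (n*(i+1)+j) (if obsAt obs i j ≠ 3 ∧ obsAt obs (i+1) j ≠ 3 then 1 else 0) else [])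

def pvCellB1 (n : Int) (obs : List (List Int)) (i j : Int) : List (Int × Int × Int) :=
  [(n*i + j, n*i + j, if obsAt obs i j ≠ 3 then 1 else 0)]

def pvCellB2 (m n : Int) (obs : List (List Int)) (i j : Int) : List (Int × Int × Int) :=
  let a := n*i + j
  (if j < n - 1 then pvPair a (a+1) (if obsAt obs i j ≠ 3 ∧ obsAt obs i (j+1) ≠ 3 then 1 else 0) else [])
  ++ (if i < m - 1 then pvPair a (n*(i+1)+j) (if obsAt obs i j ≠ 3 ∧ obsAt obs (i+1) j ≠ 3 then 1 else 0) else [])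

def pvGrid (m n : Int) (cell : Int → Int → List (Int × Int × Int)) : List (Int × Int × Int) :=
  (PySem.List.pyRange 0 m 1).flatMap (fun i => (PySem.List.pyRange 0 n 1).flatMap (cell i))

def pvWritesA (m n : Int) (obs : List (List Int)) : List (Int × Int × Int) :=
  pvGrid m n (pvCellC m n obs)
def pvWritesB (m n : Int) (obs : List (List Int)) : List (Int × Int × Int) :=
  pvGrid m n (pvCellB1 n obs) ++ pvGrid m n (pvCellB2 m n obs)

-- the single value every write to (r, c) carries: 1 iff both endpoint cells are free
def pvF (n : Int) (obs : List (List Int)) (r c : Int) : Int :=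
  if obsAt obs (r / n) (r % n) ≠ 3 ∧ obsAt obs (c / n) (c % n) ≠ 3 then 1 else 0

def pvGetE (g : List (List Int)) (r c : Nat) : Option Int := g[r]?.bind (fun row => row[c]?)
def pvTouch (w : List (Int × Int × Int)) (r c : Int) : Bool := w.any (fun t => t.1 == r && t.2.1 == c)

theorem pvApply_append (g : List (List Int)) (w1 w2 : List (Int × Int × Int)) :
    pvApply g (w1 ++ w2) = pvApply (pvApply g w1) w2 := List.foldl_append ..

theorem pvFoldl_apply (xs : List Int) (ws : Int → List (Int × Int × Int)) (g : List (List Int)) :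
    xs.foldl (fun g x => pvApply g (ws x)) g = pvApply g (xs.flatMap ws) := by
  induction xs generalizing g with
  | nil => rfl
  | cons x xs ih => simp [List.flatMap_cons, pvApply_append, ih]

theorem pvSetAt_getE (g : List (List Int)) (r0 c0 : Int) (hr : 0 ≤ r0) (hc : 0 ≤ c0) (v : Int)
    (r c : Nat) :
    pvGetE (setAt g r0 c0 v) r c =
      if r0 = (r : Int) ∧ c0 = (c : Int) then (pvGetE g r c).map (fun _ => v) else pvGetE g r c := by
  obtain ⟨R, rfl⟩ : ∃ R : Nat, r0 = (R : Int) := ⟨r0.toNat, (Int.toNat_of_nonneg hr).symm⟩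
  obtain ⟨C, rfl⟩ : ∃ C : Nat, c0 = (C : Int) := ⟨c0.toNat, (Int.toNat_of_nonneg hc).symm⟩
  unfold setAt pvGetE
  rw [PySem.List.pySetD_of_nonneg _ _ hr, PySem.List.pySetD_of_nonneg _ _ hc,
    PySem.List.pyGetD_natCast]
  simp only [Int.toNat_natCast, Nat.cast_inj]
  by_cases hR : R = r
  · subst hR
    by_cases hrl : R < g.length
    · rw [List.getElem?_set, if_pos rfl, if_pos hrl]
      simp only [List.getD, List.getElem?_eq_getElem hrl, Option.getD_some, Option.bind_some]
      by_cases hC : C = c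
      · subst hC
        rw [List.getElem?_set, if_pos rfl]
        by_cases hcl : C < (g[R]).length
        · rw [if_pos hcl]
          simp [List.getElem?_eq_getElem hcl]
        · rw [if_neg hcl]
          simp [List.getElem?_eq_none (show (g[R]).length ≤ C by omega)]
      · rw [List.getElem?_set, if_neg hC, if_neg (by intro h; exact hC (by exact_mod_cast h.2))]
    · rw [List.set_eq_of_length_le (by omega)]
      simp [List.getElem?_eq_none (show g.length ≤ R by omega)]
  · rw [List.getElem?_set, if_neg hR, if_neg (by intro h; exact hR (by exact_mod_cast h.1))]

theorem pvSetAt_rowlen (g : List (List Int)) (r0 c0 : Int) (hr : 0 ≤ r0) (hc : 0 ≤ c0) (v : Int)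
    (r : Nat) :
    ((setAt g r0 c0 v)[r]?).map List.length = (g[r]?).map List.length := by
  obtain ⟨R, rfl⟩ : ∃ R : Nat, r0 = (R : Int) := ⟨r0.toNat, (Int.toNat_of_nonneg hr).symm⟩
  obtain ⟨C, rfl⟩ : ∃ C : Nat, c0 = (C : Int) := ⟨c0.toNat, (Int.toNat_of_nonneg hc).symm⟩
  unfold setAt
  rw [PySem.List.pySetD_of_nonneg _ _ hr, PySem.List.pySetD_of_nonneg _ _ hc,
    PySem.List.pyGetD_natCast]
  simp only [Int.toNat_natCast]
  rw [List.getElem?_set]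
  by_cases hR : R = r
  · subst hR
    by_cases hrl : R < g.length
    · rw [if_pos rfl, if_pos hrl, List.getElem?_eq_getElem hrl]
      simp [List.getD, List.getElem?_eq_getElem hrl]
    · rw [if_pos rfl, if_neg hrl, List.getElem?_eq_none (by omega)]
  · rw [if_neg hR]

theorem pvApply_getE (f : Int → Int → Int) (w : List (Int × Int × Int))
    (hw : ∀ t ∈ w, 0 ≤ t.1 ∧ 0 ≤ t.2.1 ∧ t.2.2 = f t.1 t.2.1) (g : List (List Int)) (r c : Nat) :
    pvGetE (pvApply g w) r c =
      if pvTouch w r c then (pvGetE g r c).map (fun _ => f r c) else pvGetE g r c := by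
  induction w generalizing g with
  | nil => simp [pvApply, pvTouch]
  | cons t w ih =>
    obtain ⟨h1, h2, h3⟩ := hw t (List.mem_cons_self ..)
    have hw' : ∀ t ∈ w, 0 ≤ t.1 ∧ 0 ≤ t.2.1 ∧ t.2.2 = f t.1 t.2.1 :=
      fun t ht => hw t (List.mem_cons_of_mem _ ht)
    have hstep : pvApply g (t :: w) = pvApply (setAt g t.1 t.2.1 t.2.2) w := rfl
    rw [hstep, ih hw']
    have hset := pvSetAt_getE g t.1 t.2.1 h1 h2 t.2.2 r c
    by_cases hhit : t.1 = (r : Int) ∧ t.2.1 = (c : Int)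
    · have htc : pvTouch (t :: w) r c = true := by
        simp [pvTouch, List.any_cons]; left; exact ⟨by simp [hhit.1], by simp [hhit.2]⟩
      rw [htc, if_pos rfl]
      by_cases htw : pvTouch w (r : Int) (c : Int)
      · rw [if_pos htw, hset, if_pos hhit]
        cases pvGetE g r c <;> simp
      · rw [if_neg (by simpa using htw), hset, if_pos hhit]
        have : f t.1 t.2.1 = f r c := by rw [hhit.1, hhit.2]
        rw [h3, this]
    · have hset' : pvGetE (setAt g t.1 t.2.1 t.2.2) r c = pvGetE g r c := by
        rw [hset, if_neg hhit]
      rw [hset']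
      have htc : pvTouch (t :: w) r c = pvTouch w r c := by
        simp only [pvTouch, List.any_cons]
        have : (t.1 == (r : Int) && t.2.1 == (c : Int)) = false := by
          simp only [Bool.and_eq_false_iff, beq_eq_false_iff_ne, ne_eq]
          by_cases h : t.1 = (r : Int)
          · right; intro hcc; exact hhit ⟨h, hcc⟩
          · left; exact h
        simp [this]
      rw [htc]

theorem pvApply_rowlen (w : List (Int × Int × Int))
    (hw : ∀ t ∈ w, 0 ≤ t.1 ∧ 0 ≤ t.2.1) (g : List (List Int)) (r : Nat) :
    ((pvApply g w)[r]?).map List.length = (g[r]?).map List.length := by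
  induction w generalizing g with
  | nil => rfl
  | cons t w ih =>
    obtain ⟨h1, h2⟩ := hw t (List.mem_cons_self ..)
    have hw' : ∀ t ∈ w, 0 ≤ t.1 ∧ 0 ≤ t.2.1 := fun t ht => hw t (List.mem_cons_of_mem _ ht)
    have hstep : pvApply g (t :: w) = pvApply (setAt g t.1 t.2.1 t.2.2) w := rfl
    rw [hstep, ih hw', pvSetAt_rowlen _ _ _ h1 h2]

theorem pvApply_congr (f : Int → Int → Int) (w1 w2 : List (Int × Int × Int))
    (h1 : ∀ t ∈ w1, 0 ≤ t.1 ∧ 0 ≤ t.2.1 ∧ t.2.2 = f t.1 t.2.1)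
    (h2 : ∀ t ∈ w2, 0 ≤ t.1 ∧ 0 ≤ t.2.1 ∧ t.2.2 = f t.1 t.2.1)
    (ht : ∀ r c : Nat, pvTouch w1 (r : Int) (c : Int) = pvTouch w2 (r : Int) (c : Int))
    (g : List (List Int)) : pvApply g w1 = pvApply g w2 := by
  apply List.ext_getElem?
  intro r
  have hl1 := pvApply_rowlen w1 (fun t ht' => ⟨(h1 t ht').1, (h1 t ht').2.1⟩) g r
  have hl2 := pvApply_rowlen w2 (fun t ht' => ⟨(h2 t ht').1, (h2 t ht').2.1⟩) g r
  have he : ∀ c : Nat, pvGetE (pvApply g w1) r c = pvGetE (pvApply g w2) r c := by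
    intro c
    rw [pvApply_getE f w1 h1 g r c, pvApply_getE f w2 h2 g r c, ht r c]
  cases hrow : (g[r]? : Option (List Int)) with
  | none =>
    rw [hrow] at hl1 hl2
    cases h1' : (pvApply g w1)[r]? with
    | none => cases h2' : (pvApply g w2)[r]? with
      | none => rfl
      | some row => rw [h2'] at hl2; simp at hl2
    | some row => rw [h1'] at hl1; simp at hl1
  | some row =>
    rw [hrow] at hl1 hl2
    cases h1' : (pvApply g w1)[r]? with
    | none => rw [h1'] at hl1; simp at hl1
    | some row1 =>
      cases h2' : (pvApply g w2)[r]? with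
      | none => rw [h2'] at hl2; simp at hl2
      | some row2 =>
        congr 1
        apply List.ext_getElem?
        intro c
        have := he c
        simp only [pvGetE, h1', h2', Option.bind_some] at this
        exact this

set_option maxHeartbeats 1000000 in
theorem pvBodyA (m n : Int) (obs : List (List Int)) (g : List (List Int)) (i j : Int) :
    (if obsAt obs i j ≠ 3 then
        let diag_ind := n*i + j
        let g := setAt g diag_ind diag_ind 1
        let g := if j < n - 1 then
            let right_ind := n*i + j + 1
            if obsAt obs i (j+1) ≠ 3 then
              setAt (setAt g diag_ind right_ind 1) right_ind diag_ind 1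
            else
              setAt (setAt g diag_ind right_ind 0) right_ind diag_ind 0
          else g
        let g := if j > 0 then
            let left_ind := n*i + j - 1
            if obsAt obs i (j-1) ≠ 3 then
              setAt (setAt g diag_ind left_ind 1) left_ind diag_ind 1
            else
              setAt (setAt g diag_ind left_ind 0) left_ind diag_ind 0
          else g
        let g := if i > 0 then
            let up_ind := n*(i-1) + j
            if obsAt obs (i-1) j ≠ 3 then
              setAt (setAt g diag_ind up_ind 1) up_ind diag_ind 1
            else
              setAt (setAt g diag_ind up_ind 0) up_ind diag_ind 0
          else g
        if i < m - 1 then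
            let down_ind := n*(i+1) + j
            if obsAt obs (i+1) j ≠ 3 then
              setAt (setAt g diag_ind down_ind 1) down_ind diag_ind 1
            else
              setAt (setAt g diag_ind down_ind 0) down_ind diag_ind 0
          else g
      else
        let diag_ind := n*i + j
        let g := setAt g diag_ind diag_ind 0
        let g := if j < n - 1 then
            let right_ind := n*i + j + 1
            setAt (setAt g diag_ind right_ind 0) right_ind diag_ind 0
          else g
        let g := if j > 0 then
            let left_ind := n*i + j - 1
            setAt (setAt g diag_ind left_ind 0) left_ind diag_ind 0
          else g
        let g := if i > 0 then
            let up_ind := n*(i-1) + j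
            setAt (setAt g diag_ind up_ind 0) up_ind diag_ind 0
          else g
        if i < m - 1 then
            let down_ind := n*(i+1) + j
            setAt (setAt g diag_ind down_ind 0) down_ind diag_ind 0
          else g) = pvApply g (pvCellC m n obs i j) := by
  by_cases h1 : obsAt obs i j ≠ 3
  · rw [if_pos h1]
    dsimp only [pvCellC, pvPair]
    simp only [ne_eq] at h1 ⊢
    simp only [h1, not_false_eq_true, true_and]
    split_ifs <;> rfl
  · rw [if_neg h1]
    have h2 : obsAt obs i j = 3 := not_not.mp h1
    dsimp only [pvCellC, pvPair]
    simp only [h2, ne_eq, not_true_eq_false, false_and, if_false]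
    split_ifs <;> rfl

theorem pvFoldl_ext (xs : List Int) (f f' : List (List Int) → Int → List (List Int))
    (h : ∀ b a, f b a = f' b a) (g : List (List Int)) : xs.foldl f g = xs.foldl f' g := by
  induction xs generalizing g with
  | nil => rfl
  | cons x xs ih => simp only [List.foldl_cons, h, ih]

theorem pvPortA_eq (m n : Int) (adj obs : List (List Int)) :
    update_adj_mat m n adj obs = pvApply adj (pvWritesA m n obs) := by
  unfold update_adj_mat pvWritesA pvGrid
  refine (pvFoldl_ext _ _ (fun g i => pvApply g ((PySem.List.pyRange 0 n 1).flatMap (pvCellC m n obs i))) (fun g i => ?_) adj).trans (pvFoldl_apply ..)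
  exact (pvFoldl_ext _ _ (fun g j => pvApply g (pvCellC m n obs i j))
    (fun g j => pvBodyA m n obs g i j) g).trans (pvFoldl_apply ..)

theorem pvBodyB2 (m n : Int) (obs : List (List Int)) (g : List (List Int)) (i j : Int) :
    (let a := n*i + j
      let g := if j < n - 1 then
          let v := if obsAt obs i j ≠ 3 ∧ obsAt obs i (j+1) ≠ 3 then 1 else 0
          setAt (setAt g a (a+1) v) (a+1) a v
        else g
      if i < m - 1 then
          let b := n*(i+1) + j
          let v := if obsAt obs i j ≠ 3 ∧ obsAt obs (i+1) j ≠ 3 then 1 else 0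
          setAt (setAt g a b v) b a v
        else g) = pvApply g (pvCellB2 m n obs i j) := by
  dsimp only [pvCellB2, pvPair]
  split_ifs <;> rfl

theorem pvPortB_eq (m n : Int) (adj obs : List (List Int)) :
    update_adj_mat_alt m n adj obs = pvApply adj (pvWritesB m n obs) := by
  unfold update_adj_mat_alt pvWritesB pvGrid
  rw [pvApply_append]
  have h1 : ∀ (g : List (List Int)),
      (PySem.List.pyRange 0 m 1).foldl (fun g i =>
        (PySem.List.pyRange 0 n 1).foldl (fun g j =>
          let d := n*i + j
          setAt g d d (if obsAt obs i j ≠ 3 then 1 else 0)) g) g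
      = pvApply g ((PySem.List.pyRange 0 m 1).flatMap
          (fun i => (PySem.List.pyRange 0 n 1).flatMap (pvCellB1 n obs i))) := by
    intro g
    refine (pvFoldl_ext _ _ (fun g i => pvApply g ((PySem.List.pyRange 0 n 1).flatMap (pvCellB1 n obs i))) (fun g i => ?_) g).trans (pvFoldl_apply ..)
    exact (pvFoldl_ext _ _ (fun g j => pvApply g (pvCellB1 n obs i j))
      (fun g j => rfl) g).trans (pvFoldl_apply ..)
  rw [h1]
  refine (pvFoldl_ext _ _ (fun g i => pvApply g ((PySem.List.pyRange 0 n 1).flatMap (pvCellB2 m n obs i))) (fun g i => ?_) _).trans (pvFoldl_apply ..)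
  exact (pvFoldl_ext _ _ (fun g j => pvApply g (pvCellB2 m n obs i j))
    (fun g j => pvBodyB2 m n obs g i j) g).trans (pvFoldl_apply ..)

theorem pvDecode (n i j : Int) (hn : 0 < n) (hj : 0 ≤ j) (hjn : j < n) :
    (n*i + j) / n = i ∧ (n*i + j) % n = j := by
  constructor
  · rw [show n*i + j = j + n*i by ring, Int.add_mul_ediv_left j i (by omega : n ≠ 0),
      Int.ediv_eq_zero_of_lt hj hjn, zero_add]
  · rw [show n*i + j = j + n*i by ring, Int.add_mul_emod_self_left, Int.emod_eq_of_lt hj hjn]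

theorem pvF_pair (n : Int) (obs : List (List Int)) (i j i' j' : Int) (hn : 0 < n)
    (hj : 0 ≤ j) (hjn : j < n) (hj' : 0 ≤ j') (hjn' : j' < n) :
    pvF n obs (n*i + j) (n*i' + j') =
      (if obsAt obs i j ≠ 3 ∧ obsAt obs i' j' ≠ 3 then 1 else 0) := by
  obtain ⟨hd1, hm1⟩ := pvDecode n i j hn hj hjn
  obtain ⟨hd2, hm2⟩ := pvDecode n i' j' hn hj' hjn'
  unfold pvF
  rw [hd1, hm1, hd2, hm2]

theorem pvMem_ite (c : Prop) [Decidable c] (l : List (Int × Int × Int)) (t : Int × Int × Int) :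
    (t ∈ if c then l else []) ↔ c ∧ t ∈ l := by
  split_ifs with h <;> simp [h]

def pvOk (n : Int) (obs : List (List Int)) (t : Int × Int × Int) : Prop :=
  0 ≤ t.1 ∧ 0 ≤ t.2.1 ∧ t.2.2 = pvF n obs t.1 t.2.1

theorem pvConsistPair (n : Int) (obs : List (List Int)) (i j i' j' : Int) (hn : 0 < n)
    (hi : 0 ≤ i) (hj : 0 ≤ j) (hjn : j < n) (hi' : 0 ≤ i') (hj' : 0 ≤ j') (hjn' : j' < n) :
    ∀ t ∈ pvPair (n*i + j) (n*i' + j')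
        (if obsAt obs i j ≠ 3 ∧ obsAt obs i' j' ≠ 3 then 1 else 0), pvOk n obs t := by
  have ha : 0 ≤ n*i + j := by have := mul_nonneg hn.le hi; omega
  have hb : 0 ≤ n*i' + j' := by have := mul_nonneg hn.le hi'; omega
  intro t ht
  simp only [pvPair, List.mem_cons, List.not_mem_nil, or_false] at ht
  rcases ht with rfl | rfl
  · exact ⟨ha, hb, (pvF_pair n obs i j i' j' hn hj hjn hj' hjn').symm⟩
  · refine ⟨hb, ha, ?_⟩
    rw [pvF_pair n obs i' j' i j hn hj' hjn' hj hjn]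
    exact if_congr (by tauto) rfl rfl

theorem pvConsistA (m n : Int) (obs : List (List Int)) :
    ∀ t ∈ pvWritesA m n obs, pvOk n obs t := by
  intro t ht
  unfold pvWritesA pvGrid at ht
  simp only [List.mem_flatMap, PySem.List.mem_pyRange_one] at ht
  obtain ⟨i, ⟨hi0, him⟩, j, ⟨hj0, hjn⟩, ht⟩ := ht
  have hn : 0 < n := by omega
  dsimp only [pvCellC] at ht
  simp only [List.mem_append, pvMem_ite, List.mem_cons, List.not_mem_nil, or_false] at ht
  rcases ht with (((rfl | ⟨hc, ht⟩) | ⟨hc, ht⟩) | ⟨hc, ht⟩) | ⟨hc, ht⟩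
  · have hd : 0 ≤ n*i + j := by have := mul_nonneg hn.le hi0; omega
    refine ⟨hd, hd, ?_⟩
    dsimp only
    rw [pvF_pair n obs i j i j hn hj0 hjn hj0 hjn]
    simp
  · have := pvConsistPair n obs i j i (j+1) hn hi0 hj0 hjn hi0 (by omega) (by omega)
    rw [show n*i + (j+1) = n*i + j + 1 by ring] at this
    exact this t ht
  · have := pvConsistPair n obs i j i (j-1) hn hi0 hj0 hjn hi0 (by omega) (by omega)
    rw [show n*i + (j-1) = n*i + j - 1 by ring] at this
    exact this t ht
  · exact pvConsistPair n obs i j (i-1) j hn hi0 hj0 hjn (by omega) hj0 hjn t ht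
  · exact pvConsistPair n obs i j (i+1) j hn hi0 hj0 hjn (by omega) hj0 hjn t ht

theorem pvConsistB (m n : Int) (obs : List (List Int)) :
    ∀ t ∈ pvWritesB m n obs, pvOk n obs t := by
  intro t ht
  unfold pvWritesB pvGrid at ht
  rw [List.mem_append] at ht
  rcases ht with ht | ht <;>
    simp only [List.mem_flatMap, PySem.List.mem_pyRange_one] at ht <;>
    obtain ⟨i, ⟨hi0, him⟩, j, ⟨hj0, hjn⟩, ht⟩ := ht <;> have hn : 0 < n := by omega
  · dsimp only [pvCellB1] at ht
    simp only [List.mem_cons, List.not_mem_nil, or_false] at ht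
    subst ht
    have hd : 0 ≤ n*i + j := by have := mul_nonneg hn.le hi0; omega
    refine ⟨hd, hd, ?_⟩
    dsimp only
    rw [pvF_pair n obs i j i j hn hj0 hjn hj0 hjn]
    simp
  · dsimp only [pvCellB2] at ht
    simp only [List.mem_append, pvMem_ite] at ht
    rcases ht with ⟨hc, ht⟩ | ⟨hc, ht⟩
    · have := pvConsistPair n obs i j i (j+1) hn hi0 hj0 hjn hi0 (by omega) (by omega)
      rw [show n*i + (j+1) = n*i + j + 1 by ring] at this
      exact this t ht
    · exact pvConsistPair n obs i j (i+1) j hn hi0 hj0 hjn (by omega) hj0 hjn t ht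

theorem pvTouchP (w : List (Int × Int × Int)) (r c : Int) :
    pvTouch w r c = true ↔ ∃ t ∈ w, t.1 = r ∧ t.2.1 = c := by
  simp [pvTouch, List.any_eq_true]

theorem pvTouch_iff (m n : Int) (obs : List (List Int)) (r c : Int) :
    pvTouch (pvWritesA m n obs) r c = pvTouch (pvWritesB m n obs) r c := by
  rw [Bool.eq_iff_iff, pvTouchP, pvTouchP]
  constructor
  · rintro ⟨t, ht, hr, hc⟩
    unfold pvWritesA pvGrid at ht
    simp only [List.mem_flatMap, PySem.List.mem_pyRange_one] at ht
    obtain ⟨i, ⟨hi0, him⟩, j, ⟨hj0, hjn⟩, ht⟩ := ht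
    dsimp only [pvCellC] at ht
    simp only [List.mem_append, pvMem_ite, List.mem_cons, List.not_mem_nil, or_false] at ht
    unfold pvWritesB pvGrid
    rcases ht with (((rfl | ⟨hcnd, ht⟩) | ⟨hcnd, ht⟩) | ⟨hcnd, ht⟩) | ⟨hcnd, ht⟩
    · -- diagonal: same write appears in B's first pass
      refine ⟨_, ?_, hr, hc⟩
      rw [List.mem_append]
      left
      simp only [List.mem_flatMap, PySem.List.mem_pyRange_one]
      exact ⟨i, ⟨hi0, him⟩, j, ⟨hj0, hjn⟩, by simp [pvCellB1]⟩
    · -- right edge: same pair appears in B's second pass at the same cell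
      refine ⟨t, ?_, hr, hc⟩
      rw [List.mem_append]
      right
      simp only [List.mem_flatMap, PySem.List.mem_pyRange_one]
      refine ⟨i, ⟨hi0, him⟩, j, ⟨hj0, hjn⟩, ?_⟩
      dsimp only [pvCellB2]
      simp only [List.mem_append, pvMem_ite]
      exact Or.inl ⟨hcnd, ht⟩
    · -- left edge of (i,j) = right edge of (i, j-1)
      simp only [pvPair, List.mem_cons, List.not_mem_nil, or_false] at ht
      rcases ht with rfl | rfl <;> dsimp only at hr hc
      · refine ⟨(n*i + (j-1) + 1, n*i + (j-1),
          if obsAt obs i (j-1) ≠ 3 ∧ obsAt obs i (j-1+1) ≠ 3 then 1 else 0), ?_, by dsimp only; omega, by dsimp only; omega⟩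
        rw [List.mem_append]
        right
        simp only [List.mem_flatMap, PySem.List.mem_pyRange_one]
        refine ⟨i, ⟨hi0, him⟩, j-1, ⟨by omega, by omega⟩, ?_⟩
        dsimp only [pvCellB2]
        simp only [List.mem_append, pvMem_ite, pvPair, List.mem_cons, List.not_mem_nil, or_false]
        exact Or.inl ⟨by omega, Or.inr trivial⟩
      · refine ⟨(n*i + (j-1), n*i + (j-1) + 1,
          if obsAt obs i (j-1) ≠ 3 ∧ obsAt obs i (j-1+1) ≠ 3 then 1 else 0), ?_, by dsimp only; omega, by dsimp only; omega⟩
        rw [List.mem_append]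
        right
        simp only [List.mem_flatMap, PySem.List.mem_pyRange_one]
        refine ⟨i, ⟨hi0, him⟩, j-1, ⟨by omega, by omega⟩, ?_⟩
        dsimp only [pvCellB2]
        simp only [List.mem_append, pvMem_ite, pvPair, List.mem_cons, List.not_mem_nil, or_false]
        exact Or.inl ⟨by omega, Or.inl trivial⟩
    · -- up edge of (i,j) = down edge of (i-1, j)
      have e1 : n*((i-1)+1) = n*i := by ring
      simp only [pvPair, List.mem_cons, List.not_mem_nil, or_false] at ht
      rcases ht with rfl | rfl <;> dsimp only at hr hc
      · refine ⟨(n*((i-1)+1) + j, n*(i-1) + j,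
          if obsAt obs (i-1) j ≠ 3 ∧ obsAt obs (i-1+1) j ≠ 3 then 1 else 0), ?_, by dsimp only; omega, by dsimp only; omega⟩
        rw [List.mem_append]
        right
        simp only [List.mem_flatMap, PySem.List.mem_pyRange_one]
        refine ⟨i-1, ⟨by omega, by omega⟩, j, ⟨hj0, hjn⟩, ?_⟩
        dsimp only [pvCellB2]
        simp only [List.mem_append, pvMem_ite, pvPair, List.mem_cons, List.not_mem_nil, or_false]
        exact Or.inr ⟨by omega, Or.inr trivial⟩
      · refine ⟨(n*(i-1) + j, n*((i-1)+1) + j,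
          if obsAt obs (i-1) j ≠ 3 ∧ obsAt obs (i-1+1) j ≠ 3 then 1 else 0), ?_, by dsimp only; omega, by dsimp only; omega⟩
        rw [List.mem_append]
        right
        simp only [List.mem_flatMap, PySem.List.mem_pyRange_one]
        refine ⟨i-1, ⟨by omega, by omega⟩, j, ⟨hj0, hjn⟩, ?_⟩
        dsimp only [pvCellB2]
        simp only [List.mem_append, pvMem_ite, pvPair, List.mem_cons, List.not_mem_nil, or_false]
        exact Or.inr ⟨by omega, Or.inl trivial⟩
    · -- down edge: same pair appears in B's second pass at the same cell
      refine ⟨t, ?_, hr, hc⟩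
      rw [List.mem_append]
      right
      simp only [List.mem_flatMap, PySem.List.mem_pyRange_one]
      refine ⟨i, ⟨hi0, him⟩, j, ⟨hj0, hjn⟩, ?_⟩
      dsimp only [pvCellB2]
      simp only [List.mem_append, pvMem_ite]
      exact Or.inr ⟨hcnd, ht⟩
  · rintro ⟨t, ht, hr, hc⟩
    unfold pvWritesB pvGrid at ht
    rw [List.mem_append] at ht
    unfold pvWritesA pvGrid
    simp only [List.mem_flatMap, PySem.List.mem_pyRange_one] at ht ⊢
    rcases ht with ht | ht <;> obtain ⟨i, ⟨hi0, him⟩, j, ⟨hj0, hjn⟩, ht⟩ := ht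
    · -- B diagonal write = A diagonal write
      refine ⟨t, ⟨i, ⟨hi0, him⟩, j, ⟨hj0, hjn⟩, ?_⟩, hr, hc⟩
      dsimp only [pvCellB1] at ht
      dsimp only [pvCellC]
      simp only [List.mem_append, pvMem_ite, List.mem_cons, List.not_mem_nil, or_false] at ht ⊢
      exact Or.inl (Or.inl (Or.inl (Or.inl ht)))
    · -- B edge write = A right/down write at the same cell
      refine ⟨t, ⟨i, ⟨hi0, him⟩, j, ⟨hj0, hjn⟩, ?_⟩, hr, hc⟩
      dsimp only [pvCellB2] at ht
      dsimp only [pvCellC]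
      simp only [List.mem_append, pvMem_ite, List.mem_cons, List.not_mem_nil, or_false] at ht ⊢
      rcases ht with ⟨h1, h2⟩ | ⟨h1, h2⟩
      · exact Or.inl (Or.inl (Or.inl (Or.inr ⟨h1, h2⟩)))
      · exact Or.inr ⟨h1, h2⟩

-- ===== VERDICT (by name: the statement is the Claim_ definition above) =====
theorem update_adj_mat_spec : Claim_equal_update_adj_mat := by
  intro m n adj obs _ _
  unfold Spec_update_adj_mat
  rw [pvPortA_eq, pvPortB_eq]
  exact pvApply_congr (pvF n obs) _ _ (fun t ht => pvConsistA m n obs t ht)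
    (fun t ht => pvConsistB m n obs t ht) (fun r c => pvTouch_iff m n obs r c) adj
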